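-- pv_equiv track=rewrite | github.com/kgransee/MC-CDR_Tool | simulations.py | _step_xy
-- ===== SOURCE A (Python) =====
-- def _step_xy(edges, heights):
--     if not heights:
--         return [], []
--
--     xs = [edges[0]]
--     ys = [heights[0]]
--
--     for i in range(len(heights)):
--         xs.append(edges[i + 1])
--         ys.append(heights[i])
--
--         if i + 1 < len(heights):
--             xs.append(edges[i + 1])
--             ys.append(heights[i + 1])
--
--     return xs, ys
-- ===== SOURCE B (Python) =====
-- def _step_xy(edges, heights):
--     if not heights:
--         return [], []
--     n = len(heights)
--     ys = [h for h in heights for _ in (0, 1)]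
--     xs = [edges[0]]
--     for i in range(1, n):
--         xs += [edges[i], edges[i]]
--     xs.append(edges[n])
--     return xs, ys
-- ===== Notes on version B (the rewrite author's own statement) =====
-- stated objective: simpler
-- what changed: Replaces A's single interleaved loop with conditional double-appends by two independent passes: ys is each height emitted twice via a comprehension, xs is the first edge, each interior edge twice, and the last edge.
import Mathlib
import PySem

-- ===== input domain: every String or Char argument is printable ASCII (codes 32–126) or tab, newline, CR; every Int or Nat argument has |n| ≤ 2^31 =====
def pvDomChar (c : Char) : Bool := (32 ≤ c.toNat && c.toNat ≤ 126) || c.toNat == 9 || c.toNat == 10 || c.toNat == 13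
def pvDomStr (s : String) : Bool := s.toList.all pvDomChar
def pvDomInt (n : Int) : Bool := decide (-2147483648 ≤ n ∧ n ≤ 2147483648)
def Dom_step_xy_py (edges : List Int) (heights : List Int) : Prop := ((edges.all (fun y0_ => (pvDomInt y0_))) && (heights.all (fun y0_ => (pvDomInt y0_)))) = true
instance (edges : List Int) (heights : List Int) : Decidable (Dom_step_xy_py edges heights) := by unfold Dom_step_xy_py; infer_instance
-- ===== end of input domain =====

-- B builds ys and xs in two independent straight passes (each height twice; first edge,
-- interior edges twice, last edge) instead of A's single interleaved loop: simpler.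

-- ===== PORT A =====
def step_xy_py (edges : List Int) (heights : List Int) : List Int × List Int :=
  if heights = [] then ([], [])
  else
    let n : Int := heights.length
    (PySem.List.pyRange 0 n 1).foldl
      (fun (st : List Int × List Int) i =>
        let xs := st.1 ++ [PySem.List.pyGetD edges (i + 1) 0]
        let ys := st.2 ++ [PySem.List.pyGetD heights i 0]
        if i + 1 < n then
          (xs ++ [PySem.List.pyGetD edges (i + 1) 0],
           ys ++ [PySem.List.pyGetD heights (i + 1) 0])
        else (xs, ys))
      ([PySem.List.pyGetD edges 0 0], [PySem.List.pyGetD heights 0 0])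

-- ===== PORT B =====
def step_xy_py_alt (edges : List Int) (heights : List Int) : List Int × List Int :=
  if heights = [] then ([], [])
  else
    let n : Int := heights.length
    let ys := heights.flatMap (fun h => [h, h])
    let xs :=
      ((PySem.List.pyRange 1 n 1).foldl
        (fun (acc : List Int) i =>
          acc ++ [PySem.List.pyGetD edges i 0, PySem.List.pyGetD edges i 0])
        [PySem.List.pyGetD edges 0 0]) ++ [PySem.List.pyGetD edges n 0]
    (xs, ys)

-- ===== PRECONDITION & SPEC =====
-- Pre_ excludes exactly the inputs where A (and B) raise IndexError: nonempty heights
-- with fewer than len(heights)+1 edges.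
def Pre_step_xy_py (edges : List Int) (heights : List Int) : Prop :=
  heights = [] ∨ heights.length + 1 ≤ edges.length
instance (edges : List Int) (heights : List Int) : Decidable (Pre_step_xy_py edges heights) := by
  unfold Pre_step_xy_py; infer_instance

def pvWitness_step_xy_py : List Int × List Int := ([0, 1, 2, 3], [5, 6, 7])

def Spec_step_xy_py (edges : List Int) (heights : List Int) (out : List Int × List Int) : Prop :=
  out = step_xy_py_alt edges heights
instance (edges : List Int) (heights : List Int) (out : List Int × List Int) :
    Decidable (Spec_step_xy_py edges heights out) := by unfold Spec_step_xy_py; infer_instance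

-- ===== CLAIM (what is proved, stated in full; the proofs are below) =====
def Claim_equal_step_xy_py : Prop :=
  ∀ (edges : List Int) (heights : List Int), Dom_step_xy_py edges heights →
    Pre_step_xy_py edges heights → Spec_step_xy_py edges heights (step_xy_py edges heights)

-- ===== LEMMAS AND PROOFS =====

-- Shifting the index range by one.
lemma pv_shift_flatMap (g : Int → List Int) (a b : Int) :
    (PySem.List.pyRange a b 1).flatMap (fun i => g (i + 1)) =
    (PySem.List.pyRange (a + 1) (b + 1) 1).flatMap g := by
  rw [PySem.List.pyRange_one, PySem.List.pyRange_one]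
  have h : (b + 1 - (a + 1)).toNat = (b - a).toNat := by omega
  rw [h, List.flatMap_map, List.flatMap_map]
  apply List.flatMap_congr
  intro x _
  ring_nf

-- The reshuffling at the heart of the equivalence: A's "h_i then h_{i+1}" emission,
-- seeded with f 0, equals "each f k twice" followed by the final f m.
lemma pv_L1 (f : Int → Int) (m : Int) (hm : 0 ≤ m) :
    [f 0] ++ (PySem.List.pyRange 0 m 1).flatMap (fun i => [f i, f (i + 1)]) =
    (PySem.List.pyRange 0 m 1).flatMap (fun k => [f k, f k]) ++ [f m] := by
  induction m, hm using Int.le_induction with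
  | base => simp [PySem.List.pyRange_one_eq_nil]
  | succ m hm ih =>
      rw [PySem.List.pyRange_one_succ_right (by omega)]
      simp only [List.flatMap_append, List.flatMap_cons, List.flatMap_nil,
        List.append_nil, ← List.append_assoc]
      rw [ih]
      simp [List.append_assoc]

-- Step function of A's loop split into two independent appends (zeta-reduced form).
lemma pv_stepA_eq (edges heights : List Int) (n : Int) :
    (fun (st : List Int × List Int) (i : Int) =>
        if i + 1 < n then
          (st.1 ++ [PySem.List.pyGetD edges (i + 1) 0] ++ [PySem.List.pyGetD edges (i + 1) 0],
           st.2 ++ [PySem.List.pyGetD heights i 0] ++ [PySem.List.pyGetD heights (i + 1) 0])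
        else (st.1 ++ [PySem.List.pyGetD edges (i + 1) 0], st.2 ++ [PySem.List.pyGetD heights i 0])) =
    (fun (st : List Int × List Int) (i : Int) =>
        (st.1 ++ (if i + 1 < n then
            [PySem.List.pyGetD edges (i + 1) 0, PySem.List.pyGetD edges (i + 1) 0]
          else [PySem.List.pyGetD edges (i + 1) 0]),
         st.2 ++ (if i + 1 < n then
            [PySem.List.pyGetD heights i 0, PySem.List.pyGetD heights (i + 1) 0]
          else [PySem.List.pyGetD heights i 0]))) := by
  funext st i
  by_cases h : i + 1 < n <;> simp [h]

theorem step_xy_py_spec_aux (edges heights : List Int)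
    (_hpre : Pre_step_xy_py edges heights) :
    step_xy_py edges heights = step_xy_py_alt edges heights := by
  by_cases hh : heights = []
  · simp [step_xy_py, step_xy_py_alt, hh]
  · have hlen : 1 ≤ (heights.length : Int) := by
      have := List.length_pos_iff.mpr hh; omega
    have hA : step_xy_py edges heights =
        ([PySem.List.pyGetD edges 0 0] ++ (PySem.List.pyRange 0 (heights.length : Int) 1).flatMap
            (fun i => if i + 1 < (heights.length : Int) then
                [PySem.List.pyGetD edges (i + 1) 0, PySem.List.pyGetD edges (i + 1) 0]
              else [PySem.List.pyGetD edges (i + 1) 0]),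
         [PySem.List.pyGetD heights 0 0] ++ (PySem.List.pyRange 0 (heights.length : Int) 1).flatMap
            (fun i => if i + 1 < (heights.length : Int) then
                [PySem.List.pyGetD heights i 0, PySem.List.pyGetD heights (i + 1) 0]
              else [PySem.List.pyGetD heights i 0])) := by
      simp only [step_xy_py, if_neg hh]
      rw [pv_stepA_eq edges heights (heights.length : Int)]
      rw [PySem.List.foldl_prod_mk
        (f := fun (s : List Int) (i : Int) => s ++
          (if i + 1 < (heights.length : Int) then
              [PySem.List.pyGetD edges (i + 1) 0, PySem.List.pyGetD edges (i + 1) 0]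
            else [PySem.List.pyGetD edges (i + 1) 0]))
        (g := fun (s : List Int) (i : Int) => s ++
          (if i + 1 < (heights.length : Int) then
              [PySem.List.pyGetD heights i 0, PySem.List.pyGetD heights (i + 1) 0]
            else [PySem.List.pyGetD heights i 0]))]
      rw [PySem.List.foldl_append_eq_flatMap, PySem.List.foldl_append_eq_flatMap]
    have hB : step_xy_py_alt edges heights =
        ([PySem.List.pyGetD edges 0 0] ++ (PySem.List.pyRange 1 (heights.length : Int) 1).flatMap
              (fun i => [PySem.List.pyGetD edges i 0, PySem.List.pyGetD edges i 0])
            ++ [PySem.List.pyGetD edges (heights.length : Int) 0],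
         heights.flatMap (fun h => [h, h])) := by
      simp only [step_xy_py_alt, if_neg hh]
      rw [PySem.List.foldl_append_eq_flatMap]
    rw [hA, hB]
    set n : Int := (heights.length : Int) with hn
    set E : Int → Int := fun i => PySem.List.pyGetD edges i 0 with hE
    set H : Int → Int := fun i => PySem.List.pyGetD heights i 0 with hH
    have hsplit : PySem.List.pyRange 0 n 1 = PySem.List.pyRange 0 (n - 1) 1 ++ [n - 1] := by
      have := PySem.List.pyRange_one_succ_right (a := 0) (b := n - 1) (by omega)
      rw [sub_add_cancel] at this
      exact this
    rw [Prod.mk.injEq]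
    refine ⟨?_, ?_⟩
    · -- xs component
      rw [hsplit, List.flatMap_append]
      have hlast : ([n - 1] : List Int).flatMap
          (fun i => if i + 1 < n then [E (i + 1), E (i + 1)] else [E (i + 1)]) = [E n] := by
        simp only [List.flatMap_cons, List.flatMap_nil, List.append_nil]
        rw [if_neg (by omega), sub_add_cancel]
      rw [hlast]
      have hcongr : (PySem.List.pyRange 0 (n - 1) 1).flatMap
          (fun i => if i + 1 < n then [E (i + 1), E (i + 1)] else [E (i + 1)]) =
          (PySem.List.pyRange 0 (n - 1) 1).flatMap (fun i => [E (i + 1), E (i + 1)]) := by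
        apply List.flatMap_congr
        intro x hx
        rw [PySem.List.mem_pyRange_one] at hx
        rw [if_pos (by omega)]
      rw [hcongr, pv_shift_flatMap (fun i => [E i, E i]) 0 (n - 1)]
      rw [zero_add, sub_add_cancel]
      simp [hE]
    · -- ys component
      rw [hsplit, List.flatMap_append]
      have hlast : ([n - 1] : List Int).flatMap
          (fun i => if i + 1 < n then [H i, H (i + 1)] else [H i]) = [H (n - 1)] := by
        simp only [List.flatMap_cons, List.flatMap_nil, List.append_nil]
        rw [if_neg (by omega)]
      rw [hlast]
      have hcongr : (PySem.List.pyRange 0 (n - 1) 1).flatMap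
          (fun i => if i + 1 < n then [H i, H (i + 1)] else [H i]) =
          (PySem.List.pyRange 0 (n - 1) 1).flatMap (fun i => [H i, H (i + 1)]) := by
        apply List.flatMap_congr
        intro x hx
        rw [PySem.List.mem_pyRange_one] at hx
        rw [if_pos (by omega)]
      rw [hcongr, ← List.append_assoc, pv_L1 H (n - 1) (by omega)]
      have hheights : heights.flatMap (fun h => [h, h]) =
          (PySem.List.pyRange 0 n 1).flatMap (fun k => [H k, H k]) := by
        conv_lhs => rw [← PySem.List.map_pyGetD_pyRange_zero' heights 0]
        rw [List.flatMap_map]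
      rw [hheights, hsplit, List.flatMap_append]
      simp [List.append_assoc]

-- ===== VERDICT (by name: the statement is the Claim_ definition above) =====
theorem step_xy_py_spec : Claim_equal_step_xy_py := by
  intro edges heights _ hpre
  exact step_xy_py_spec_aux edges heights hpre
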